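-- pv_equiv track=rewrite | github.com/ragul-kachiappan/Line-Encoding-Schemes | src/line_encoding/encoders/base.py | pseudo
-- ===== SOURCE A (Python) =====
-- from typing import List
--
-- def pseudo(b: List[int]) -> List[int]:
--     """Pseudoternary encoding.
--
--     Args:
--         b: List of binary input bits
--
--     Returns:
--         List of encoded values
--     """
--     e = []
--     first = 1
--     flag = 0
--     for i in range(len(b)):
--         if b[i] == 1:
--             e.append(0)
--         else:
--             if first:
--                 e.append(1)
--                 flag = 1
--                 first = 0
--             else:
--                 if flag == 1:
--                     e.append(-1)
--                     flag = 0
--                 else: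
--                     e.append(1)
--                     flag = 1
--     e.append(-1)
--     return e
-- ===== SOURCE B (Python) =====
-- from typing import List
--
-- def pseudo(b: List[int]) -> List[int]:
--     """Pseudoternary encoding via a rank-parity closed form: each non-1 bit's
--     value is determined by the parity of the count of non-1 bits before it
--     (even rank -> +1, odd rank -> -1); 1-bits map to 0; trailing -1 appended.
--     No running polarity/flag state is carried."""
--     pref = [0]
--     for x in b:
--         pref.append(pref[-1] + (x != 1))
--     return [0 if x == 1 else (1 if c % 2 == 0 else -1)
--             for x, c in zip(b, pref)] + [-1]
-- ===== Notes on version B (the rewrite author's own statement) =====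
-- stated objective: alternative
-- what changed: Replaces A's sequential first/flag state machine by a rank-parity closed form: a prefix-count array of non-1 bits is built once, and each output value is computed positionally (1-bit -> 0, non-1 bit -> +1/-1 by the parity of its rank among non-1 bits) via zip, with the trailing -1 appended.
import Mathlib
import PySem

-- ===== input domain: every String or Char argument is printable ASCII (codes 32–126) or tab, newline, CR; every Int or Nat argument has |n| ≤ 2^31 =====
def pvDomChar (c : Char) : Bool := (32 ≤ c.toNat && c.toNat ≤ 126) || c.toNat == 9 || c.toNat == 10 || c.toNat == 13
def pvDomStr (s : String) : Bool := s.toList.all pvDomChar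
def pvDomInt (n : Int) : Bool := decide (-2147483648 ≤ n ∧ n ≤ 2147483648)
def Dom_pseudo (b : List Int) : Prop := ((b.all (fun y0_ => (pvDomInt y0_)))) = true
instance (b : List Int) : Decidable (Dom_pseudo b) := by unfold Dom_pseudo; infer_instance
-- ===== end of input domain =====

-- B replaces A's first/flag state machine by a prefix-count-of-zeros array and a positional rank-parity formula; same output, same cost.


-- ===== PORT A =====
-- A's loop over the bits with accumulator e and int state first/flag (Python truthiness `if first:` = first ≠ 0)
def pseudoLoop (rest : List Int) (e : List Int) (first flag : Int) : List Int :=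
  match rest with
  | [] => e
  | x :: t =>
    if x = 1 then pseudoLoop t (e ++ [0]) first flag
    else
      if first ≠ 0 then pseudoLoop t (e ++ [1]) 0 1
      else
        if flag = 1 then pseudoLoop t (e ++ [-1]) first 0
        else pseudoLoop t (e ++ [1]) first 1

def pseudo (b : List Int) : List Int :=
  pseudoLoop b [] 1 0 ++ [-1]

-- ===== PORT B =====
-- prefix counts of non-1 bits: Source B's `pref` list (length n+1), built front to back from start c
def pseudoPref (b : List Int) (c : Int) : List Int :=
  match b with
  | [] => [c]
  | x :: t => c :: pseudoPref t (c + (if x ≠ 1 then 1 else 0))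

-- the comprehension over zip(b, pref): positional rank-parity formula
def pseudo_alt (b : List Int) : List Int :=
  ((b.zip (pseudoPref b 0)).map
    (fun p => if p.1 = 1 then 0 else if p.2 % 2 = 0 then 1 else -1)) ++ [-1]

-- ===== PRECONDITION & SPEC =====
def Spec_pseudo (b : List Int) (out : List Int) : Prop := out = pseudo_alt b
instance (b : List Int) (out : List Int) : Decidable (Spec_pseudo b out) := by unfold Spec_pseudo; infer_instance

-- ===== CLAIM (what is proved, stated in full; the proofs are below) =====
def Claim_equal_pseudo : Prop := ∀ (b : List Int), Dom_pseudo b → Spec_pseudo b (pseudo b)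

-- ===== LEMMAS AND PROOFS =====

-- Invariant tying A's (first, flag) state to the parity of the count c of non-1 bits seen:
-- the next non-1 bit A emits is +1 iff c is even.
theorem pseudoLoop_eq_rank (rest : List Int) (e : List Int) (first flag c : Int)
    (h : (first ≠ 0 ∨ flag ≠ 1) ↔ c % 2 = 0) :
    pseudoLoop rest e first flag =
      e ++ (rest.zip (pseudoPref rest c)).map
        (fun p => if p.1 = 1 then 0 else if p.2 % 2 = 0 then 1 else -1) := by
  induction rest generalizing e first flag c with
  | nil => simp [pseudoLoop, pseudoPref]
  | cons x t ih =>
    by_cases hx : x = 1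
    · rw [pseudoLoop, if_pos hx, ih (e ++ [0]) first flag c h]
      simp [pseudoPref, hx]
    · by_cases hc : c % 2 = 0
      · have hd : (2:Int) ∣ c := by omega
        by_cases hf : first ≠ 0
        · rw [pseudoLoop, if_neg hx, if_pos hf,
            ih (e ++ [1]) 0 1 (c + 1) (by omega)]
          simp [pseudoPref, hx, hd]
        · have hg : flag ≠ 1 := by
            rcases h.mpr hc with h'|h'
            · exact absurd h' hf
            · exact h'
          rw [pseudoLoop, if_neg hx, if_neg hf, if_neg hg,
            ih (e ++ [1]) first 1 (c + 1) (by omega)]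
          simp [pseudoPref, hx, hd]
      · have hd : ¬ (2:Int) ∣ c := by omega
        have hf : first = 0 := by
          by_contra hf; exact hc (h.mp (Or.inl hf))
        have hg : flag = 1 := by
          by_contra hg; exact hc (h.mp (Or.inr hg))
        rw [pseudoLoop, if_neg hx, if_neg (by simp [hf]), if_pos hg,
          ih (e ++ [-1]) first 0 (c + 1) (by omega)]
        simp [pseudoPref, hx, hd]

-- ===== VERDICT (by name: the statement is the Claim_ definition above) =====
theorem pseudo_spec : Claim_equal_pseudo := by
  intro b _
  unfold Spec_pseudo pseudo pseudo_alt
  rw [pseudoLoop_eq_rank b [] 1 0 0 (by norm_num)]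
  simp
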